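-- pv_equiv track=rewrite | github.com/Peakergzf/empirical-model-learning-in-minizinc | wdp-max-decision-tree/data-preprocessing/dt_format_conversion.py | pre_process_edges
-- ===== SOURCE A (Python) =====
-- def pre_process_edges(edges):
--     """
--     :param edges: a list of list of edges (outer list: each level; inner list: each edge)
--     :return: node_num: bfs order for each node (except the root node)
--                    has_child: whether has child or not for each node (except the root node)
--     """
--     node_num = [[] for _ in range(len(edges))]
--     has_child = [[] for _ in range(len(edges))]
--
--     bfs_order = 2  # (skip the root node)
--
--     for i in range(len(edges)):
--         level = edges[i]
--         for edge in level:
--             node_num[i].append(bfs_order)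
--             has_child[i].append(":" not in edge)
--             bfs_order += 1
--
--     return node_num, has_child
-- ===== SOURCE B (Python) =====
-- def pre_process_edges(edges):
--     # Recursive back-to-front peel: compute the total BFS count first, then number
--     # levels from the LAST one backwards, each time subtracting the level's size
--     # from the running end; no forward counter is ever incremented.
--     total = 2 + sum(len(level) for level in edges)
--
--     def peel(levels, end):
--         # number 'levels' so that their BFS numbers finish just before 'end'
--         if not levels:
--             return [], []
--         *init, last = levels
--         start = end - len(last)
--         nn, hc = peel(init, start)
--         nn.append(list(range(start, end)))
--         hc.append([":" not in e for e in last])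
--         return nn, hc
--
--     return peel(edges, total)
-- ===== Notes on version B (the rewrite author's own statement) =====
-- stated objective: alternative
-- what changed: Replaces the forward counter-incrementing nested loop by a recursive back-to-front peel: the total BFS count is computed once, then each level (taken from the end) gets its numbers by subtracting its size from a running end bound, recursing on the remaining prefix.
import Mathlib
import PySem

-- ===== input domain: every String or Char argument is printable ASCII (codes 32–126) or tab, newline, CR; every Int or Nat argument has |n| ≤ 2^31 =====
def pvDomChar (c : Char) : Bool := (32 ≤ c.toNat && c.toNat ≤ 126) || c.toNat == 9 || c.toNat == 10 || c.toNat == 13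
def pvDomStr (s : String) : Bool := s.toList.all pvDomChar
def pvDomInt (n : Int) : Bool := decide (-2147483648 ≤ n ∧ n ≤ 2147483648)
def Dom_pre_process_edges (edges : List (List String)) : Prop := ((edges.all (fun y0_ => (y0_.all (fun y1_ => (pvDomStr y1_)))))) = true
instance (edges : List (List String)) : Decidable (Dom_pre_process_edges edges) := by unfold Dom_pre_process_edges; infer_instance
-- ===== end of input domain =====

-- B replaces A's forward counter-incrementing nested loop by a recursive back-to-front peel
-- (total computed once, levels numbered from the end by subtraction); alternative decomposition, same cost.

-- ===== PORT A =====
-- the inner 'for edge in level' loop: appends bfs_order and the flag, increments the counter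
def pvAInner (level : List String) (acc : List Int × List Bool × Int) : List Int × List Bool × Int :=
  level.foldl (fun a edge =>
    (a.1 ++ [a.2.2], a.2.1 ++ [!(PySem.Str.isIn ":" edge)], a.2.2 + 1)) acc

def pre_process_edges (edges : List (List String)) : List (List Int) × List (List Bool) :=
  let r := edges.foldl (fun (acc : List (List Int) × List (List Bool) × Int) level =>
    let inner := pvAInner level ([], [], acc.2.2)
    (acc.1 ++ [inner.1], acc.2.1 ++ [inner.2.1], inner.2.2)) ([], [], 2)
  (r.1, r.2.1)

-- ===== PORT B =====
-- 'peel': recursively number levels from the LAST one backwards; 'e' is one past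
-- the last BFS number these levels use
def pvPeel : List (List String) → Int → List (List Int) × List (List Bool)
  | [], _ => ([], [])
  | x :: xs, e =>
    let last := (x :: xs).getLast (by simp)
    let start := e - last.length
    let p := pvPeel (x :: xs).dropLast start
    (p.1 ++ [PySem.List.pyRange start e 1],
     p.2 ++ [last.map (fun s => !(PySem.Str.isIn ":" s))])
termination_by ls => ls.length
decreasing_by simp [List.length_dropLast]

def pre_process_edges_alt (edges : List (List String)) : List (List Int) × List (List Bool) :=
  pvPeel edges (2 + (edges.map (fun l => (l.length : Int))).sum)

-- ===== PRECONDITION & SPEC =====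
def Spec_pre_process_edges (edges : List (List String)) (out : List (List Int) × List (List Bool)) : Prop := out = pre_process_edges_alt edges
instance (edges : List (List String)) (out : List (List Int) × List (List Bool)) : Decidable (Spec_pre_process_edges edges out) := by unfold Spec_pre_process_edges; infer_instance

-- ===== CLAIM (what is proved, stated in full; the proofs are below) =====
def Claim_equal_pre_process_edges : Prop := ∀ (edges : List (List String)), Dom_pre_process_edges edges → Spec_pre_process_edges edges (pre_process_edges edges)

-- ===== LEMMAS AND PROOFS =====

-- starting BFS numbers of the levels (proof-side characterisation, used for both ports)
def pvStarts (edges : List (List String)) (total : Int) : List Int :=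
  match edges with
  | [] => []
  | level :: rest => total :: pvStarts rest (total + level.length)

-- A's inner loop numbers a level with the contiguous range starting at the counter
theorem pvAInner_eq (level : List String) (ns : List Int) (bs : List Bool) (b : Int) :
    pvAInner level (ns, bs, b) =
      (ns ++ PySem.List.pyRange b (b + level.length) 1,
       bs ++ level.map (fun e => !(PySem.Str.isIn ":" e)),
       b + level.length) := by
  induction level generalizing ns bs b with
  | nil => simp [pvAInner, PySem.List.pyRange_one_eq_nil]
  | cons e rest ih =>
    rw [show pvAInner (e :: rest) (ns, bs, b) =
        pvAInner rest (ns ++ [b], bs ++ [!(PySem.Str.isIn ":" e)], b + 1) from rfl, ih]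
    have hlt : b < b + ((rest.length : Int) + 1) := by omega
    have he : b + ((rest.length : Int) + 1) = (b + 1) + (rest.length : Int) := by ring
    simp only [List.map_cons, List.length_cons, List.append_assoc, List.singleton_append,
      Prod.mk.injEq]
    push_cast
    refine ⟨?_, by first | rfl | trivial, by ring⟩
    rw [PySem.List.pyRange_one_cons hlt, he]

-- A's outer loop, characterised via the per-level start offsets
theorem pvAOuter_eq (edges : List (List String)) (nn : List (List Int)) (hc : List (List Bool)) (b : Int) :
    edges.foldl (fun (acc : List (List Int) × List (List Bool) × Int) level =>
        let inner := pvAInner level ([], [], acc.2.2)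
        (acc.1 ++ [inner.1], acc.2.1 ++ [inner.2.1], inner.2.2)) (nn, hc, b) =
      (nn ++ ((pvStarts edges b).zip edges).map (fun p => PySem.List.pyRange p.1 (p.1 + p.2.length) 1),
       hc ++ edges.map (fun level => level.map (fun e => !(PySem.Str.isIn ":" e))),
       b + ((edges.map (fun l => (l.length : Int))).sum)) := by
  induction edges generalizing nn hc b with
  | nil => simp [pvStarts]
  | cons level rest ih =>
    rw [List.foldl_cons]
    show List.foldl _
        (nn ++ [(pvAInner level ([], [], b)).1], hc ++ [(pvAInner level ([], [], b)).2.1],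
          (pvAInner level ([], [], b)).2.2) rest = _
    rw [pvAInner_eq level [] [] b]
    simp only [List.nil_append]
    rw [ih]
    simp only [pvStarts, List.zip_cons_cons, List.map_cons, List.sum_cons, Prod.mk.injEq,
      List.append_assoc, List.singleton_append]
    exact ⟨by first | rfl | trivial, by first | rfl | trivial, by ring⟩

theorem pvStarts_length (edges : List (List String)) (b : Int) :
    (pvStarts edges b).length = edges.length := by
  induction edges generalizing b with
  | nil => simp [pvStarts]
  | cons l r ih => simp [pvStarts, ih]

theorem pvStarts_append (ls : List (List String)) (l : List String) (b : Int) :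
    pvStarts (ls ++ [l]) b = pvStarts ls b ++ [b + ((ls.map (fun x => (x.length : Int))).sum)] := by
  induction ls generalizing b with
  | nil => simp [pvStarts]
  | cons x r ih =>
    simp only [List.cons_append, pvStarts, ih, List.map_cons, List.sum_cons]
    congr 2
    ring

theorem pvPeel_concat (ls : List (List String)) (l : List String) (e : Int) :
    pvPeel (ls ++ [l]) e =
      ((pvPeel ls (e - l.length)).1 ++ [PySem.List.pyRange (e - l.length) e 1],
       (pvPeel ls (e - l.length)).2 ++ [l.map (fun s => !(PySem.Str.isIn ":" s))]) := by
  obtain ⟨x, xs, h⟩ := List.exists_cons_of_ne_nil (l := ls ++ [l]) (by simp)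
  rw [h, pvPeel]
  have h1 : (x :: xs).getLast (by simp) = l := by
    have h' : (x :: xs).getLast? = some l := by rw [← h]; simp
    rw [List.getLast?_eq_some_getLast (by simp)] at h'
    exact Option.some.inj h' 
  have h2 : (x :: xs).dropLast = ls := by
    rw [← h]; exact List.dropLast_concat ..
  simp only [h1, h2]

-- B's peel equals the starts-based characterisation, pointing the end bound past all levels
theorem pvPeel_eq (edges : List (List String)) (b : Int) :
    pvPeel edges (b + ((edges.map (fun l => (l.length : Int))).sum)) =
      (((pvStarts edges b).zip edges).map (fun p => PySem.List.pyRange p.1 (p.1 + p.2.length) 1),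
       edges.map (fun level => level.map (fun e => !(PySem.Str.isIn ":" e)))) := by
  induction edges using List.reverseRecOn with
  | nil => rw [pvPeel]; simp [pvStarts]
  | append_singleton ls l ih =>
    have hb : b + (((ls ++ [l]).map (fun x => (x.length : Int))).sum)
        = (b + ((ls.map (fun x => (x.length : Int))).sum)) + (l.length : Int) := by
      simp; ring
    rw [hb, pvPeel_concat]
    have hs : (b + ((ls.map (fun x => (x.length : Int))).sum)) + (l.length : Int) - (l.length : Int)
        = b + ((ls.map (fun x => (x.length : Int))).sum) := by ring
    rw [hs, ih, pvStarts_append]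
    have hz : (pvStarts ls b ++ [b + ((ls.map (fun x => (x.length : Int))).sum)]).zip (ls ++ [l])
        = (pvStarts ls b).zip ls ++ [(b + ((ls.map (fun x => (x.length : Int))).sum), l)] := by
      rw [List.zip_append (by rw [pvStarts_length])]
      rfl
    rw [hz]
    simp only [List.map_append, List.map_cons, List.map_nil]

-- ===== VERDICT (by name: the statement is the Claim_ definition above) =====
theorem pre_process_edges_spec : Claim_equal_pre_process_edges := by
  intro edges _
  show pre_process_edges edges = pre_process_edges_alt edges
  unfold pre_process_edges pre_process_edges_alt
  rw [pvAOuter_eq]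
  rw [show (2 : Int) + ((edges.map (fun l => (l.length : Int))).sum) = _ from rfl, pvPeel_eq]
  simp
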